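-- pv_equiv track=rewrite | github.com/YashIndane/codewars-solutions | python/Consecutive_letters.py | solve
-- ===== SOURCE A (Python) =====
-- def solve(st):
--     if len(st) == 1:
--         return True
--     q = "abcdefghijklmnopqrstuvwxyz"
--     s = [x for x in st]
--     p = set(s)
--     if len(s) != len(p):
--         return False
--     else:
--         s.sort()
--         a = "".join(s)
--         return a in q
-- ===== SOURCE B (Python) =====
-- def solve(st):
--     if len(st) <= 1:
--         return True
--     if len(set(st)) != len(st):
--         return False
--     lo, hi = min(st), max(st)
--     return 'a' <= lo and hi <= 'z' and ord(hi) - ord(lo) + 1 == len(st)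
-- ===== Notes on version B (the rewrite author's own statement) =====
-- stated objective: simpler
-- what changed: Replaces sort-and-alphabet-substring lookup with a single min/max arithmetic range check: distinct chars, all lowercase, and ord(max)-ord(min)+1 == len.
import Mathlib
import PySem

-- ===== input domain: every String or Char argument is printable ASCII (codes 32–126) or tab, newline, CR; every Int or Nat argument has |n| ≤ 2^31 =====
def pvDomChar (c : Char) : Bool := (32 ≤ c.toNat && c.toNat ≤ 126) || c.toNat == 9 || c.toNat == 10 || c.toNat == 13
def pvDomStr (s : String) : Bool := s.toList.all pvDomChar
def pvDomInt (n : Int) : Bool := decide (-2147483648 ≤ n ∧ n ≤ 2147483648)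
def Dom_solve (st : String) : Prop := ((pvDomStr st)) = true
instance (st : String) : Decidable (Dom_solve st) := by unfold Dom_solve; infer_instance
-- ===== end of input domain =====

-- B is simpler: min/max arithmetic range check instead of sort + alphabet-substring test.

-- ===== PORT A =====
def solve (st : String) : Bool :=
  if PySem.Str.len st == 1 then true
  else
    let s := st.toList
    let p := PySem.Set.ofList s
    if s.length != p.length then false
    else
      -- s.sort(); a = "".join(s); a in q  — the substring test on the joined chars is Chars.isIn (exact)
      PySem.Chars.isIn (PySem.List.sorted s (fun x => x)) "abcdefghijklmnopqrstuvwxyz".toList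

-- ===== PORT B =====
def solve_alt (st : String) : Bool :=
  let s := st.toList
  if s.length ≤ 1 then true
  else if (PySem.Set.ofList s).length != s.length then false
  else
    match PySem.List.min? s (fun x => x), PySem.List.max? s (fun x => x) with
    | some lo, some hi =>
        decide ('a' ≤ lo) && decide (hi ≤ 'z') &&
          (((hi.toNat : Int) - (lo.toNat : Int) + 1) == (s.length : Int))
    | _, _ => false

-- ===== PRECONDITION & SPEC =====
def Spec_solve (st : String) (out : Bool) : Prop := out = solve_alt st
instance (st : String) (out : Bool) : Decidable (Spec_solve st out) := by unfold Spec_solve; infer_instance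

-- ===== CLAIM (what is proved, stated in full; the proofs are below) =====
def Claim_equal_solve : Prop := ∀ (st : String), Dom_solve st → Spec_solve st (solve st)

-- ===== LEMMAS AND PROOFS =====

theorem pvCharLe (c d : Char) : c ≤ d ↔ c.toNat ≤ d.toNat := by
  rw [Char.le_def, UInt32.le_iff_toNat_le]
  exact Iff.rfl

theorem pvCharLt (c d : Char) : c < d ↔ c.toNat < d.toNat := by
  rw [Char.lt_def, UInt32.lt_iff_toNat_lt]
  exact Iff.rfl

theorem pvCharEq (c d : Char) (h : c.toNat = d.toNat) : c = d :=
  Char.ext (UInt32.toNat_inj.mp h)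

theorem pvAlphaGet : ∀ j, (h : j < 26) → ("abcdefghijklmnopqrstuvwxyz".toList)[j].toNat = 97 + j := by
  decide

theorem pvAlphaLen : ("abcdefghijklmnopqrstuvwxyz".toList).length = 26 := by decide

-- bound on the length of a foldl over Set.add
theorem pvFoldlAddLen (l : List Char) : ∀ (s : List Char),
    (List.foldl PySem.Set.add s l).length ≤ s.length + l.length := by
  induction l with
  | nil => simp
  | cons x t ih =>
    intro s
    simp only [List.foldl_cons]
    have h1 := ih (PySem.Set.add s x)
    have h2 : (PySem.Set.add s x).length ≤ s.length + 1 := by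
      unfold PySem.Set.add; split <;> simp
    simp only [List.length_cons]
    omega

-- if the foldl does not shrink anything, the folded list was duplicate-free and disjoint from the seed
theorem pvNodupOfLen (l : List Char) : ∀ (s : List Char),
    (List.foldl PySem.Set.add s l).length = s.length + l.length →
    l.Nodup ∧ ∀ x ∈ l, x ∉ s := by
  induction l with
  | nil => simp
  | cons x t ih =>
    intro s h
    simp only [List.foldl_cons, List.length_cons] at h
    have hb := pvFoldlAddLen t (PySem.Set.add s x)
    by_cases hx : x ∈ s
    · exfalso
      have hadd : PySem.Set.add s x = s := by
        simp [PySem.Set.add, PySem.Set.contains, List.contains_eq_mem, hx]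
      rw [hadd] at h hb
      omega
    · have hadd : PySem.Set.add s x = s ++ [x] := by
        simp [PySem.Set.add, PySem.Set.contains, List.contains_eq_mem, hx]
      rw [hadd] at h
      have hlen : (s ++ [x]).length = s.length + 1 := by simp
      obtain ⟨hnd, hnin⟩ := ih (s ++ [x]) (by rw [hlen]; omega)
      refine ⟨List.nodup_cons.mpr ⟨fun hxt => (hnin x hxt) (by simp), hnd⟩, ?_⟩
      intro y hy hys
      rcases List.mem_cons.mp hy with hyx | hyt
      · exact hx (hyx ▸ hys)
      · exact (hnin y hyt) (by simp [hys])

theorem pvFoldlAddNodup (l : List Char) : ∀ (s : List Char),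
    l.Nodup → (∀ x ∈ l, x ∉ s) → List.foldl PySem.Set.add s l = s ++ l := by
  induction l with
  | nil => simp
  | cons x t ih =>
    intro s hnd hnin
    have hx : x ∉ s := hnin x (by simp)
    have hadd : PySem.Set.add s x = s ++ [x] := by
      simp [PySem.Set.add, PySem.Set.contains, List.contains_eq_mem, hx]
    simp only [List.foldl_cons, hadd]
    rw [ih (s ++ [x]) (List.nodup_cons.mp hnd).2]
    · simp
    · intro y hyt
      simp only [List.mem_append, List.mem_singleton, not_or]
      exact ⟨fun hys => (hnin y (by simp [hyt])) hys,
             fun hyx => (List.nodup_cons.mp hnd).1 (hyx ▸ hyt)⟩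

theorem pvOfListEqSelf (l : List Char) (h : l.Nodup) : PySem.Set.ofList l = l := by
  have := pvFoldlAddNodup l [] h (by simp)
  simpa [PySem.Set.ofList, PySem.Set.empty] using this

theorem pvOfListLenNe (l : List Char) (h : ¬ l.Nodup) :
    (PySem.Set.ofList l).length ≠ l.length := by
  intro he
  have : (List.foldl PySem.Set.add ([] : List Char) l).length = ([] : List Char).length + l.length := by
    simpa [PySem.Set.ofList, PySem.Set.empty] using he
  exact h (pvNodupOfLen l [] this).1

-- a strictly increasing char list grows at least by one per step
theorem pvChainGap (l : List Char) (hp : l.Pairwise (· < ·)) :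
    ∀ d i (h : i + d < l.length), (l[i]'(by omega)).toNat + d ≤ (l[i + d]'h).toNat := by
  intro d
  induction d with
  | zero => intro i h; simp
  | succ d ih =>
    intro i h
    have h1 : i + d < l.length := by omega
    have h2 := ih i h1
    have h3 : l[i + d]'h1 < l[i + d + 1]'(by omega) :=
      List.pairwise_iff_getElem.mp hp (i + d) (i + d + 1) h1 (by omega) (by omega)
    have h4 := (pvCharLt _ _).mp h3
    have h5 : (l[i + (d + 1)]'h).toNat = (l[i + d + 1]'(by omega)).toNat := rfl
    omega

-- core characterisation: for a strictly increasing nonempty char list, membership as a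
-- substring of the alphabet is exactly the lowercase-bounds + span condition
theorem pvKeyIff (l : List Char) (hp : l.Pairwise (· < ·)) (h1 : 1 ≤ l.length) :
    (PySem.Chars.isIn l ("abcdefghijklmnopqrstuvwxyz".toList) = true) ↔
      ('a' ≤ l[0]'(by omega) ∧ (l[l.length - 1]'(by omega)) ≤ 'z' ∧
        (l[l.length - 1]'(by omega)).toNat + 1 = (l[0]'(by omega)).toNat + l.length) := by
  rw [PySem.Chars.isIn_iff_infix]
  constructor
  · rintro ⟨s, t, hst⟩
    have hlen : s.length + l.length + t.length = 26 := by
      have := congrArg List.length hst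
      simp only [List.length_append, pvAlphaLen] at this
      omega
    have hdrop : ("abcdefghijklmnopqrstuvwxyz".toList).drop s.length = l ++ t := by
      rw [← hst, List.append_assoc, List.drop_left]
    have hget : ∀ k (hk : k < l.length), (l[k]'hk).toNat = 97 + s.length + k := by
      intro k hk
      have hpre : l <+: ("abcdefghijklmnopqrstuvwxyz".toList).drop s.length := ⟨t, hdrop.symm⟩
      have heq : l = (("abcdefghijklmnopqrstuvwxyz".toList).drop s.length).take l.length :=
        List.prefix_iff_eq_take.mp hpre
      have h5 := List.getElem_of_eq heq hk
      rw [h5]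
      simp only [List.getElem_take, List.getElem_drop]
      exact (pvAlphaGet (s.length + k) (by omega)).trans (by omega)
    have hg0 := hget 0 (by omega)
    have hgn := hget (l.length - 1) (by omega)
    refine ⟨(pvCharLe _ _).mpr ?_, (pvCharLe _ _).mpr ?_, ?_⟩
    · have ha : ('a').toNat = 97 := by decide
      omega
    · have hz : ('z').toNat = 122 := by decide
      omega
    · omega
  · rintro ⟨ha, hz, hspan⟩
    have ha' : 97 ≤ (l[0]'(by omega)).toNat := by
      have h6 : ('a').toNat = 97 := by decide
      have h7 := (pvCharLe _ _).mp ha; omega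
    have hz' : (l[l.length - 1]'(by omega)).toNat ≤ 122 := by
      have h6 : ('z').toNat = 122 := by decide
      have h7 := (pvCharLe _ _).mp hz; omega
    set b := (l[0]'(by omega)).toNat with hb
    have hup : ∀ k (hk : k < l.length), (l[k]'hk).toNat = b + k := by
      intro k hk
      have hlow := pvChainGap l hp k 0 (by omega)
      simp only [Nat.zero_add] at hlow
      have hhigh := pvChainGap l hp (l.length - 1 - k) k (by omega)
      have hidx : k + (l.length - 1 - k) = l.length - 1 := by omega
      simp only [hidx] at hhigh
      omega
    have hin : b + l.length ≤ 123 := by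
      have := hup (l.length - 1) (by omega)
      omega
    have heq : l = (("abcdefghijklmnopqrstuvwxyz".toList).drop (b - 97)).take l.length := by
      apply List.ext_getElem
      · simp
        omega
      · intro k hk1 hk2
        have hget2 : ((("abcdefghijklmnopqrstuvwxyz".toList).drop (b - 97)).take l.length)[k]'hk2
            = ("abcdefghijklmnopqrstuvwxyz".toList)[(b - 97) + k]'(by rw [pvAlphaLen]; omega) := by
          simp only [List.getElem_take, List.getElem_drop]
        rw [hget2]
        apply pvCharEq
        rw [hup k hk1]
        exact ((pvAlphaGet ((b - 97) + k) (by omega)).trans (by omega)).symm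
    rw [heq]
    exact ((List.take_prefix l.length _).isInfix).trans
      (("abcdefghijklmnopqrstuvwxyz".toList).drop_suffix (b - 97)).isInfix

-- pvKeyIff restated against named min/max characters
theorem pvKeyIff' (l : List Char) (hp : l.Pairwise (· < ·)) (h1 : 1 ≤ l.length) (lo hi : Char)
    (hl0 : l[0]'(by omega) = lo) (hln : l[l.length - 1]'(by omega) = hi) :
    (PySem.Chars.isIn l ("abcdefghijklmnopqrstuvwxyz".toList) = true) ↔
      ('a' ≤ lo ∧ hi ≤ 'z' ∧ hi.toNat + 1 = lo.toNat + l.length) := by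
  rw [← hl0, ← hln]
  exact pvKeyIff l hp h1

-- ===== VERDICT (by name: the statement is the Claim_ definition above) =====
theorem solve_spec : Claim_equal_solve := by
  intro st _
  have hbr : st.toList.length = st.length := by simp
  unfold Spec_solve solve solve_alt
  by_cases h1 : st.length = 1
  · simp [PySem.Str.len_eq, hbr, h1]
  · by_cases h0 : st.length = 0
    · have hl : st.toList = [] := by
        have hz : st.toList.length = 0 := by omega
        exact List.length_eq_zero_iff.mp hz
      have hsn : PySem.List.sorted ([] : List Char) (fun x : Char => x) = [] := rfl
      simp [PySem.Str.len_eq, hl, PySem.Set.ofList, PySem.Set.empty, hsn,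
            PySem.Chars.isIn_nil]
    · have h2 : 2 ≤ st.length := by omega
      have hA1 : ¬ (PySem.Str.len st == (1 : Int)) = true := by
        simp only [PySem.Str.len_eq, beq_iff_eq]
        omega
      have hB1 : ¬ st.toList.length ≤ 1 := by omega
      rw [if_neg hA1, if_neg hB1]
      by_cases hnd : st.toList.Nodup
      · have hset : PySem.Set.ofList st.toList = st.toList := pvOfListEqSelf _ hnd
        rw [if_neg (by simp [hset]), if_neg (by simp [hset])]
        cases hmin : PySem.List.min? st.toList (fun x => x) with
        | none =>
          exfalso
          have hx : st.toList = [] := (PySem.List.min?_eq_none_iff st.toList (fun x => x)).mp hmin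
          have hz : st.toList.length = 0 := by rw [hx]; rfl
          omega
        | some lo =>
          cases hmax : PySem.List.max? st.toList (fun x => x) with
          | none =>
            exfalso
            have hx : st.toList = [] := (PySem.List.max?_eq_none_iff st.toList (fun x => x)).mp hmax
            have hz : st.toList.length = 0 := by rw [hx]; rfl
            omega
          | some hi =>
            have hperm : (PySem.List.sorted st.toList (fun x => x)).Perm st.toList :=
              PySem.List.sorted_perm st.toList (fun x => x) false
            have hlen : (PySem.List.sorted st.toList (fun x => x)).length = st.toList.length :=
              hperm.length_eq
            have hpl : (PySem.List.sorted st.toList (fun x => x)).Pairwise (fun a b : Char => a ≤ b) :=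
              PySem.List.sorted_pairwise st.toList (fun x => x)
            have hnd' : (PySem.List.sorted st.toList (fun x => x)).Nodup := hperm.nodup_iff.mpr hnd
            have hplt : (PySem.List.sorted st.toList (fun x => x)).Pairwise (· < ·) :=
              (hpl.and hnd').imp (fun h => lt_of_le_of_ne h.1 h.2)
            have hlpos : 1 ≤ (PySem.List.sorted st.toList (fun x => x)).length := by omega
            have hl0 : (PySem.List.sorted st.toList (fun x => x))[0]'(by omega) = lo := by
              have hm0 : (PySem.List.sorted st.toList (fun x => x))[0]'(by omega) ∈ st.toList :=
                hperm.mem_iff.mp (List.getElem_mem _)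
              have hle1 : lo ≤ (PySem.List.sorted st.toList (fun x => x))[0]'(by omega) := by
                have := PySem.List.min?_isMin hmin _ hm0; simpa using this
              have hloin : lo ∈ PySem.List.sorted st.toList (fun x => x) :=
                hperm.mem_iff.mpr (PySem.List.min?_mem hmin)
              obtain ⟨i, hi', hieq⟩ := List.mem_iff_getElem.mp hloin
              have hle2 : (PySem.List.sorted st.toList (fun x => x))[0]'(by omega) ≤ lo := by
                rw [← hieq]
                have := PySem.List.key_sorted_getElem_mono (xs := st.toList) (key := fun x : Char => x)
                  (p := 0) (q := i) (by omega) hi'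
                simpa using this
              exact le_antisymm hle2 hle1
            have hln : (PySem.List.sorted st.toList (fun x => x))[(PySem.List.sorted st.toList (fun x => x)).length - 1]'(by omega) = hi := by
              have hmn : (PySem.List.sorted st.toList (fun x => x))[(PySem.List.sorted st.toList (fun x => x)).length - 1]'(by omega) ∈ st.toList :=
                hperm.mem_iff.mp (List.getElem_mem _)
              have hle1 : (PySem.List.sorted st.toList (fun x => x))[(PySem.List.sorted st.toList (fun x => x)).length - 1]'(by omega) ≤ hi := by
                have := PySem.List.max?_isMax hmax _ hmn; simpa using this
              have hhiin : hi ∈ PySem.List.sorted st.toList (fun x => x) :=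
                hperm.mem_iff.mpr (PySem.List.max?_mem hmax)
              obtain ⟨i, hi', hieq⟩ := List.mem_iff_getElem.mp hhiin
              have hle2 : hi ≤ (PySem.List.sorted st.toList (fun x => x))[(PySem.List.sorted st.toList (fun x => x)).length - 1]'(by omega) := by
                rw [← hieq]
                have := PySem.List.key_sorted_getElem_mono (xs := st.toList) (key := fun x : Char => x)
                  (p := i) (q := (PySem.List.sorted st.toList (fun x => x)).length - 1) (by omega) (by omega)
                simpa using this
              exact le_antisymm hle1 hle2
            have hkey := pvKeyIff' _ hplt hlpos lo hi hl0 hln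
            rw [hlen] at hkey
            rw [Bool.eq_iff_iff]
            simp only [Bool.and_eq_true, decide_eq_true_eq, beq_iff_eq, hkey]
            constructor
            · rintro ⟨ha, hz, hs⟩
              exact ⟨⟨ha, hz⟩, by omega⟩
            · rintro ⟨⟨ha, hz⟩, hs⟩
              exact ⟨ha, hz, by omega⟩
      · have hne : (PySem.Set.ofList st.toList).length ≠ st.toList.length := pvOfListLenNe _ hnd
        rw [if_pos (bne_iff_ne.mpr (Ne.symm hne)), if_pos (bne_iff_ne.mpr hne)]
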